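-- pv_equiv track=rewrite | github.com/MarieCMDM/ws2812b_spidev_communication | spi_led.py | color_parsing
-- ===== SOURCE A (Python) =====
-- def color_parsing(grb):
--     g, r, b = grb
--
--     # Create byte array with color data
--     color_data = []
--     for i in range(8):
--         if (g >> (7-i)) & 0b1:
--             color_data.append(0b1110)
--         else:
--             color_data.append(0b1000)
--     for i in range(8):
--         if (r >> (7-i)) & 0b1:
--             color_data.append(0b1110)
--         else:
--             color_data.append(0b100)
--     for i in range(8):
--         if (b >> (7-i)) & 0b1:
--             color_data.append(0b1110)
--         else:
--             color_data.append(0b1000)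
--
--     return color_data
-- ===== SOURCE B (Python) =====
-- # B: precomputed 256-entry lookup tables built by binary doubling (no shifts,
-- # no per-bit branches at call time); color_parsing is pure table indexing.
-- def _build(zero):
--     table = [[]]
--     for _ in range(8):
--         table = [row + [bit] for row in table for bit in (zero, 0b1110)]
--     return table
--
-- TABLE_GB = _build(0b1000)
-- TABLE_R = _build(0b100)
--
-- def color_parsing(grb):
--     g, r, b = grb
--     return TABLE_GB[g % 256] + TABLE_R[r % 256] + TABLE_GB[b % 256]
-- ===== Notes on version B (the rewrite author's own statement) =====
-- stated objective: alternative
-- what changed: Replaces A's three per-bit shift-and-branch append loops with two module-level 256-entry lookup tables (built once by binary doubling, no shifts or per-bit branches) so that color_parsing is pure table indexing on each byte value.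
import Mathlib
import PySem

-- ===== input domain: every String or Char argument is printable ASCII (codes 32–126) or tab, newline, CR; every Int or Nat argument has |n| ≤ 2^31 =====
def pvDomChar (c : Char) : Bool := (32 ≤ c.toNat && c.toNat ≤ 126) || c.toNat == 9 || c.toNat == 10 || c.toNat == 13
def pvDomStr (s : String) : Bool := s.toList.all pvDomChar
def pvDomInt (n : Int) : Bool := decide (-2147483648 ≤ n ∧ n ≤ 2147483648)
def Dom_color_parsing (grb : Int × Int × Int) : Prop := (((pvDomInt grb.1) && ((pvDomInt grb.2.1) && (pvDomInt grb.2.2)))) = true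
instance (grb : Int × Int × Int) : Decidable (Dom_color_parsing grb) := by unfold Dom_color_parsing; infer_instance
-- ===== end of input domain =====

-- B replaces A's three per-bit append loops by two 256-entry lookup tables built
-- once by binary doubling; color_parsing itself is pure table indexing (alternative).

-- ===== PORT A =====
def color_parsing (grb : Int × Int × Int) : List Int :=
  let g := grb.1; let r := grb.2.1; let b := grb.2.2
  let color_data : List Int := []
  let color_data := (PySem.List.pyRange 0 8 1).foldl (fun acc i =>
    acc ++ [if PySem.Int.band (g >>> (7 - i).toNat) 1 ≠ 0 then 0b1110 else 0b1000]) color_data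
  let color_data := (PySem.List.pyRange 0 8 1).foldl (fun acc i =>
    acc ++ [if PySem.Int.band (r >>> (7 - i).toNat) 1 ≠ 0 then 0b1110 else 0b100]) color_data
  let color_data := (PySem.List.pyRange 0 8 1).foldl (fun acc i =>
    acc ++ [if PySem.Int.band (b >>> (7 - i).toNat) 1 ≠ 0 then 0b1110 else 0b1000]) color_data
  color_data

-- ===== PORT B =====
-- table = [row + [bit] for row in table for bit in (zero, 0b1110)], 8 doubling rounds
def pvBuild (zero : Int) : List (List Int) :=
  (PySem.List.pyRange 0 8 1).foldl
    (fun table _ => table.flatMap (fun row => [row ++ [zero], row ++ [0b1110]])) [[]]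

def pvTABLE_GB : List (List Int) := pvBuild 0b1000
def pvTABLE_R : List (List Int) := pvBuild 0b100

-- TABLE[x % 256]: the index is always in range (0 ≤ x % 256 < 256 = length), so getD is exact
def color_parsing_alt (grb : Int × Int × Int) : List Int :=
  pvTABLE_GB.getD (PySem.Int.mod grb.1 256).toNat []
    ++ pvTABLE_R.getD (PySem.Int.mod grb.2.1 256).toNat []
    ++ pvTABLE_GB.getD (PySem.Int.mod grb.2.2 256).toNat []

-- ===== PRECONDITION & SPEC =====
def Spec_color_parsing (grb : Int × Int × Int) (out : List Int) : Prop := out = color_parsing_alt grb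
instance (grb : Int × Int × Int) (out : List Int) : Decidable (Spec_color_parsing grb out) := by unfold Spec_color_parsing; infer_instance

-- ===== CLAIM =====
def Claim_equal_color_parsing : Prop := ∀ (grb : Int × Int × Int), Dom_color_parsing grb → Spec_color_parsing grb (color_parsing grb)

-- ===== LEMMAS AND PROOFS =====

-- bit k (k < 8) of x as seen by A equals the corresponding bit of x % 256
theorem pvBit_mod (x : Int) (k : Nat) (hk : k < 8) :
    PySem.Int.band (x >>> k) 1 = x % 256 / 2 ^ k % 2 := by
  rw [PySem.Int.band_one, PySem.Int.mod_eq_emod_of_pos (by omega), Int.shiftRight_eq_div_pow]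
  interval_cases k <;> omega

theorem pvIteNe (a z : Int) : (if a = 0 then z else 14) = (if a ≠ 0 then (14:Int) else z) := by
  by_cases h : a = 0 <;> simp [h]

-- row n of the doubled table is the bit pattern of n, MSB first (checked on all 256 rows)
set_option maxRecDepth 4000 in
theorem pvRow8 (n : Fin 256) :
    (pvBuild 8).getD (n : Nat) ([] : List Int) =
      [if ((n:Nat):Int)/128 % 2 = 0 then 8 else 14,
       if ((n:Nat):Int)/64 % 2 = 0 then 8 else 14,
       if ((n:Nat):Int)/32 % 2 = 0 then 8 else 14,
       if ((n:Nat):Int)/16 % 2 = 0 then 8 else 14,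
       if ((n:Nat):Int)/8 % 2 = 0 then 8 else 14,
       if ((n:Nat):Int)/4 % 2 = 0 then 8 else 14,
       if ((n:Nat):Int)/2 % 2 = 0 then 8 else 14,
       if ((n:Nat):Int)/1 % 2 = 0 then 8 else 14] := by
  revert n; decide

set_option maxRecDepth 4000 in
theorem pvRow4 (n : Fin 256) :
    (pvBuild 4).getD (n : Nat) ([] : List Int) =
      [if ((n:Nat):Int)/128 % 2 = 0 then 4 else 14,
       if ((n:Nat):Int)/64 % 2 = 0 then 4 else 14,
       if ((n:Nat):Int)/32 % 2 = 0 then 4 else 14,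
       if ((n:Nat):Int)/16 % 2 = 0 then 4 else 14,
       if ((n:Nat):Int)/8 % 2 = 0 then 4 else 14,
       if ((n:Nat):Int)/4 % 2 = 0 then 4 else 14,
       if ((n:Nat):Int)/2 % 2 = 0 then 4 else 14,
       if ((n:Nat):Int)/1 % 2 = 0 then 4 else 14] := by
  revert n; decide

theorem pvChanGB (x : Int) :
    (pvBuild 8).getD (PySem.Int.mod x 256).toNat ([] : List Int) =
      [if PySem.Int.band (x >>> ((((7:Int) - 0).toNat : Nat) : Int)) 1 ≠ 0 then (14:Int) else 8,
       if PySem.Int.band (x >>> ((((7:Int) - 1).toNat : Nat) : Int)) 1 ≠ 0 then (14:Int) else 8,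
       if PySem.Int.band (x >>> ((((7:Int) - 2).toNat : Nat) : Int)) 1 ≠ 0 then (14:Int) else 8,
       if PySem.Int.band (x >>> ((((7:Int) - 3).toNat : Nat) : Int)) 1 ≠ 0 then (14:Int) else 8,
       if PySem.Int.band (x >>> ((((7:Int) - 4).toNat : Nat) : Int)) 1 ≠ 0 then (14:Int) else 8,
       if PySem.Int.band (x >>> ((((7:Int) - 5).toNat : Nat) : Int)) 1 ≠ 0 then (14:Int) else 8,
       if PySem.Int.band (x >>> ((((7:Int) - 6).toNat : Nat) : Int)) 1 ≠ 0 then (14:Int) else 8,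
       if PySem.Int.band (x >>> ((((7:Int) - 7).toNat : Nat) : Int)) 1 ≠ 0 then (14:Int) else 8] := by
  have hmod : PySem.Int.mod x 256 = x % 256 := PySem.Int.mod_eq_emod_of_pos (by omega)
  have hlt : (x % 256).toNat < 256 := by omega
  have h := pvRow8 ⟨(x % 256).toNat, hlt⟩
  rw [show (((⟨(x % 256).toNat, hlt⟩ : Fin 256) : Nat) : Int) = x % 256 from by simp only [Fin.val_mk]; omega] at h
  rw [hmod, h]
  have e0 : PySem.Int.band (x >>> ((((7:Int) - 0).toNat : Nat) : Int)) 1 = x % 256 / 128 % 2 := by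
    rw [show (((7:Int) - 0).toNat : Nat) = (7 : Nat) from rfl, Int.shiftRight_natCast_right]
    exact pvBit_mod x 7 (by omega)
  have e1 : PySem.Int.band (x >>> ((((7:Int) - 1).toNat : Nat) : Int)) 1 = x % 256 / 64 % 2 := by
    rw [show (((7:Int) - 1).toNat : Nat) = (6 : Nat) from rfl, Int.shiftRight_natCast_right]
    exact pvBit_mod x 6 (by omega)
  have e2 : PySem.Int.band (x >>> ((((7:Int) - 2).toNat : Nat) : Int)) 1 = x % 256 / 32 % 2 := by
    rw [show (((7:Int) - 2).toNat : Nat) = (5 : Nat) from rfl, Int.shiftRight_natCast_right]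
    exact pvBit_mod x 5 (by omega)
  have e3 : PySem.Int.band (x >>> ((((7:Int) - 3).toNat : Nat) : Int)) 1 = x % 256 / 16 % 2 := by
    rw [show (((7:Int) - 3).toNat : Nat) = (4 : Nat) from rfl, Int.shiftRight_natCast_right]
    exact pvBit_mod x 4 (by omega)
  have e4 : PySem.Int.band (x >>> ((((7:Int) - 4).toNat : Nat) : Int)) 1 = x % 256 / 8 % 2 := by
    rw [show (((7:Int) - 4).toNat : Nat) = (3 : Nat) from rfl, Int.shiftRight_natCast_right]
    exact pvBit_mod x 3 (by omega)
  have e5 : PySem.Int.band (x >>> ((((7:Int) - 5).toNat : Nat) : Int)) 1 = x % 256 / 4 % 2 := by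
    rw [show (((7:Int) - 5).toNat : Nat) = (2 : Nat) from rfl, Int.shiftRight_natCast_right]
    exact pvBit_mod x 2 (by omega)
  have e6 : PySem.Int.band (x >>> ((((7:Int) - 6).toNat : Nat) : Int)) 1 = x % 256 / 2 % 2 := by
    rw [show (((7:Int) - 6).toNat : Nat) = (1 : Nat) from rfl, Int.shiftRight_natCast_right]
    exact pvBit_mod x 1 (by omega)
  have e7 : PySem.Int.band (x >>> ((((7:Int) - 7).toNat : Nat) : Int)) 1 = x % 256 / 1 % 2 := by
    rw [show (((7:Int) - 7).toNat : Nat) = (0 : Nat) from rfl, Int.shiftRight_natCast_right]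
    exact pvBit_mod x 0 (by omega)
  simp only [pvIteNe, e0, e1, e2, e3, e4, e5, e6, e7]

theorem pvChanR (x : Int) :
    (pvBuild 4).getD (PySem.Int.mod x 256).toNat ([] : List Int) =
      [if PySem.Int.band (x >>> ((((7:Int) - 0).toNat : Nat) : Int)) 1 ≠ 0 then (14:Int) else 4,
       if PySem.Int.band (x >>> ((((7:Int) - 1).toNat : Nat) : Int)) 1 ≠ 0 then (14:Int) else 4,
       if PySem.Int.band (x >>> ((((7:Int) - 2).toNat : Nat) : Int)) 1 ≠ 0 then (14:Int) else 4,
       if PySem.Int.band (x >>> ((((7:Int) - 3).toNat : Nat) : Int)) 1 ≠ 0 then (14:Int) else 4,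
       if PySem.Int.band (x >>> ((((7:Int) - 4).toNat : Nat) : Int)) 1 ≠ 0 then (14:Int) else 4,
       if PySem.Int.band (x >>> ((((7:Int) - 5).toNat : Nat) : Int)) 1 ≠ 0 then (14:Int) else 4,
       if PySem.Int.band (x >>> ((((7:Int) - 6).toNat : Nat) : Int)) 1 ≠ 0 then (14:Int) else 4,
       if PySem.Int.band (x >>> ((((7:Int) - 7).toNat : Nat) : Int)) 1 ≠ 0 then (14:Int) else 4] := by
  have hmod : PySem.Int.mod x 256 = x % 256 := PySem.Int.mod_eq_emod_of_pos (by omega)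
  have hlt : (x % 256).toNat < 256 := by omega
  have h := pvRow4 ⟨(x % 256).toNat, hlt⟩
  rw [show (((⟨(x % 256).toNat, hlt⟩ : Fin 256) : Nat) : Int) = x % 256 from by simp only [Fin.val_mk]; omega] at h
  rw [hmod, h]
  have e0 : PySem.Int.band (x >>> ((((7:Int) - 0).toNat : Nat) : Int)) 1 = x % 256 / 128 % 2 := by
    rw [show (((7:Int) - 0).toNat : Nat) = (7 : Nat) from rfl, Int.shiftRight_natCast_right]
    exact pvBit_mod x 7 (by omega)
  have e1 : PySem.Int.band (x >>> ((((7:Int) - 1).toNat : Nat) : Int)) 1 = x % 256 / 64 % 2 := by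
    rw [show (((7:Int) - 1).toNat : Nat) = (6 : Nat) from rfl, Int.shiftRight_natCast_right]
    exact pvBit_mod x 6 (by omega)
  have e2 : PySem.Int.band (x >>> ((((7:Int) - 2).toNat : Nat) : Int)) 1 = x % 256 / 32 % 2 := by
    rw [show (((7:Int) - 2).toNat : Nat) = (5 : Nat) from rfl, Int.shiftRight_natCast_right]
    exact pvBit_mod x 5 (by omega)
  have e3 : PySem.Int.band (x >>> ((((7:Int) - 3).toNat : Nat) : Int)) 1 = x % 256 / 16 % 2 := by
    rw [show (((7:Int) - 3).toNat : Nat) = (4 : Nat) from rfl, Int.shiftRight_natCast_right]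
    exact pvBit_mod x 4 (by omega)
  have e4 : PySem.Int.band (x >>> ((((7:Int) - 4).toNat : Nat) : Int)) 1 = x % 256 / 8 % 2 := by
    rw [show (((7:Int) - 4).toNat : Nat) = (3 : Nat) from rfl, Int.shiftRight_natCast_right]
    exact pvBit_mod x 3 (by omega)
  have e5 : PySem.Int.band (x >>> ((((7:Int) - 5).toNat : Nat) : Int)) 1 = x % 256 / 4 % 2 := by
    rw [show (((7:Int) - 5).toNat : Nat) = (2 : Nat) from rfl, Int.shiftRight_natCast_right]
    exact pvBit_mod x 2 (by omega)
  have e6 : PySem.Int.band (x >>> ((((7:Int) - 6).toNat : Nat) : Int)) 1 = x % 256 / 2 % 2 := by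
    rw [show (((7:Int) - 6).toNat : Nat) = (1 : Nat) from rfl, Int.shiftRight_natCast_right]
    exact pvBit_mod x 1 (by omega)
  have e7 : PySem.Int.band (x >>> ((((7:Int) - 7).toNat : Nat) : Int)) 1 = x % 256 / 1 % 2 := by
    rw [show (((7:Int) - 7).toNat : Nat) = (0 : Nat) from rfl, Int.shiftRight_natCast_right]
    exact pvBit_mod x 0 (by omega)
  simp only [pvIteNe, e0, e1, e2, e3, e4, e5, e6, e7]

-- ===== VERDICT =====
theorem color_parsing_spec : Claim_equal_color_parsing := by
  intro grb _
  show color_parsing grb = color_parsing_alt grb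
  simp only [color_parsing, color_parsing_alt, pvTABLE_GB, pvTABLE_R,
    show PySem.List.pyRange 0 8 1 = [0,1,2,3,4,5,6,7] from by decide,
    List.foldl, pvChanGB, pvChanR, List.nil_append, List.cons_append]
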